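-- pv_equiv track=rewrite | github.com/Druidroid/Discada-Calculadora | scraper/main.py | _guess_units
-- ===== SOURCE A (Python) =====
-- from typing import Optional, Tuple
--
-- def _guess_units(url: str, page_text: str) -> Tuple[str, Optional[int], Optional[int]]:
--     """
--     Unidad + pack y peso por pieza/paquete.
--     """
--     low = (url + " " + page_text).lower()
--
--     # Cerveza: six-pack (precio del paquete completo)
--     if "cerveza-six-pack" in low or "six pack" in low or "six-pack" in low:
--         return "six-pack", 6, None
--
--     # Jugos/latas individuales
--     if "nectar-mixto" in low or "v8" in low or "lata" in low:
--         return "lata", 1, None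
--
--     # Carnes/verduras (por kg)
--     if "kg" in low or "kilo" in low or any(k in low for k in ["pulpa-de-res", "jamon-de-pierna", "tocineta", "cebolla"]):
--         return "kg", None, None
--
--     # Chorizo por pieza (100g)
--     if "chorizo" in low:
--         return "pieza", 1, 100
--
--     # Salchichas por paquete (800g)
--     if "salchicha" in low or "salchichas" in low:
--         return "paquete", 1, 800
--
--     # Si el propio texto menciona "paquete"
--     if "paquete" in low:
--         return "paquete", 1, 800
--
--     # Fallback
--     return "pieza", 1, None
-- ===== SOURCE B (Python) =====
-- from typing import Optional, Tuple
--
-- # Every keyword, tagged with the priority of the branch it belongs to in the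
-- # original if-chain; priority 6 is the fallback.
-- _KEYWORDS = [
--     ("cerveza-six-pack", 0), ("six pack", 0), ("six-pack", 0),
--     ("nectar-mixto", 1), ("v8", 1), ("lata", 1),
--     ("kg", 2), ("kilo", 2), ("pulpa-de-res", 2), ("jamon-de-pierna", 2),
--     ("tocineta", 2), ("cebolla", 2),
--     ("chorizo", 3),
--     ("salchicha", 4), ("salchichas", 4),
--     ("paquete", 5),
-- ]
--
-- _RESULTS = [
--     ("six-pack", 6, None),
--     ("lata", 1, None),
--     ("kg", None, None),
--     ("pieza", 1, 100),
--     ("paquete", 1, 800),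
--     ("paquete", 1, 800),
--     ("pieza", 1, None),   # fallback
-- ]
--
-- def _guess_units(url: str, page_text: str) -> Tuple[str, Optional[int], Optional[int]]:
--     low = (url + " " + page_text).lower()
--     hits = [p for kw, p in _KEYWORDS if kw in low]
--     return _RESULTS[min(hits, default=6)]
-- ===== Notes on version B (the rewrite author's own statement) =====
-- stated objective: alternative
-- what changed: Instead of a short-circuiting first-match branch chain, B exhaustively scores every keyword against the lowered text, collects the priorities of all matches, and aggregates them with min(..., default=6) to index a result table.
import Mathlib
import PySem

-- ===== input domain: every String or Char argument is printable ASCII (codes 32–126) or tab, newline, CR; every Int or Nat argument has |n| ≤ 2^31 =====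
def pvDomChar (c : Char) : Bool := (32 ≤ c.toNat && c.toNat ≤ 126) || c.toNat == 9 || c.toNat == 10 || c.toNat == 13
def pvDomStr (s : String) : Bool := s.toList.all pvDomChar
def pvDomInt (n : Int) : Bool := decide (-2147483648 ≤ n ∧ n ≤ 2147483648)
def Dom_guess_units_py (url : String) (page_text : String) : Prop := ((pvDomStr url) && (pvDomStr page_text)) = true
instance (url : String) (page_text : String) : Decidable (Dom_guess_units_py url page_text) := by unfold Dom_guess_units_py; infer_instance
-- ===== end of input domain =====

-- B replaces A's short-circuiting branch chain by exhaustive keyword scoring: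
-- collect the priorities of ALL matching keywords and aggregate with min (alternative decomposition).

-- ===== PORT A =====
def guess_units_py (url : String) (page_text : String) : String × Option Int × Option Int :=
  let low := PySem.Str.lower (url ++ " " ++ page_text)
  if PySem.Str.isIn "cerveza-six-pack" low || PySem.Str.isIn "six pack" low || PySem.Str.isIn "six-pack" low then
    ("six-pack", some 6, none)
  else if PySem.Str.isIn "nectar-mixto" low || PySem.Str.isIn "v8" low || PySem.Str.isIn "lata" low then
    ("lata", some 1, none)
  else if PySem.Str.isIn "kg" low || PySem.Str.isIn "kilo" low ||
      (["pulpa-de-res", "jamon-de-pierna", "tocineta", "cebolla"].any (fun k => PySem.Str.isIn k low)) then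
    ("kg", none, none)
  else if PySem.Str.isIn "chorizo" low then
    ("pieza", some 1, some 100)
  else if PySem.Str.isIn "salchicha" low || PySem.Str.isIn "salchichas" low then
    ("paquete", some 1, some 800)
  else if PySem.Str.isIn "paquete" low then
    ("paquete", some 1, some 800)
  else
    ("pieza", some 1, none)

-- ===== PORT B =====
-- the flat keyword table of Source B: each keyword tagged with its branch priority
def pvKeywords : List (String × Nat) :=
  [ ("cerveza-six-pack", 0), ("six pack", 0), ("six-pack", 0),
    ("nectar-mixto", 1), ("v8", 1), ("lata", 1),
    ("kg", 2), ("kilo", 2), ("pulpa-de-res", 2), ("jamon-de-pierna", 2),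
    ("tocineta", 2), ("cebolla", 2),
    ("chorizo", 3),
    ("salchicha", 4), ("salchichas", 4),
    ("paquete", 5) ]

def pvResults : List (String × Option Int × Option Int) :=
  [ ("six-pack", some 6, none),
    ("lata", some 1, none),
    ("kg", none, none),
    ("pieza", some 1, some 100),
    ("paquete", some 1, some 800),
    ("paquete", some 1, some 800),
    ("pieza", some 1, none) ]

-- the comprehension [p for kw, p in _KEYWORDS if kw in low]
def pvHits (low : String) : List Nat :=
  (pvKeywords.filter (fun kp => PySem.Str.isIn kp.1 low)).map Prod.snd

def guess_units_py_alt (url : String) (page_text : String) : String × Option Int × Option Int :=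
  let low := PySem.Str.lower (url ++ " " ++ page_text)
  -- min(hits, default=6): all priorities are ≤ 5 < 6, so the running-min fold from 6 is exact
  let i := (pvHits low).foldl Nat.min 6
  -- _RESULTS[i]: i ≤ 6 always, so the index is in range and getD never uses its default
  pvResults.getD i ("pieza", some 1, none)

-- ===== PRECONDITION & SPEC =====
def Spec_guess_units_py (url : String) (page_text : String) (out : String × Option Int × Option Int) : Prop := out = guess_units_py_alt url page_text
instance (url : String) (page_text : String) (out : String × Option Int × Option Int) : Decidable (Spec_guess_units_py url page_text out) := by unfold Spec_guess_units_py; infer_instance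

-- ===== CLAIM (what is proved, stated in full; the proofs are below) =====
def Claim_equal_guess_units_py : Prop := ∀ (url : String) (page_text : String), Dom_guess_units_py url page_text → Spec_guess_units_py url page_text (guess_units_py url page_text)

-- ===== LEMMAS AND PROOFS =====

-- the keyword table split into its priority groups
def pvG0 : List (String × Nat) := [("cerveza-six-pack", 0), ("six pack", 0), ("six-pack", 0)]
def pvG1 : List (String × Nat) := [("nectar-mixto", 1), ("v8", 1), ("lata", 1)]
def pvG2 : List (String × Nat) :=
  [("kg", 2), ("kilo", 2), ("pulpa-de-res", 2), ("jamon-de-pierna", 2), ("tocineta", 2), ("cebolla", 2)]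
def pvG3 : List (String × Nat) := [("chorizo", 3)]
def pvG4 : List (String × Nat) := [("salchicha", 4), ("salchichas", 4)]
def pvG5 : List (String × Nat) := [("paquete", 5)]

theorem pvKeywords_split : pvKeywords = pvG0 ++ pvG1 ++ pvG2 ++ pvG3 ++ pvG4 ++ pvG5 := rfl

-- hits contributed by one group
def pvGHits (g : List (String × Nat)) (low : String) : List Nat :=
  (g.filter (fun kp => PySem.Str.isIn kp.1 low)).map Prod.snd

theorem pvHits_split (low : String) :
    pvHits low = pvGHits pvG0 low ++ (pvGHits pvG1 low ++ (pvGHits pvG2 low ++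
      (pvGHits pvG3 low ++ (pvGHits pvG4 low ++ pvGHits pvG5 low)))) := by
  simp [pvHits, pvGHits, pvKeywords_split, List.filter_append, List.map_append]

theorem pvGHits_mem {g : List (String × Nat)} {j : Nat} (hj : ∀ x ∈ g, x.2 = j)
    {low : String} : ∀ x ∈ pvGHits g low, x = j := by
  intro x hx
  simp only [pvGHits, List.mem_map, List.mem_filter] at hx
  obtain ⟨kp, ⟨hmem, _⟩, hsnd⟩ := hx
  exact hsnd ▸ hj kp hmem

theorem pvGHits_ge {g : List (String × Nat)} {k j : Nat} (hall : ∀ x ∈ g, x.2 = k)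
    (hjk : j ≤ k) {low : String} : ∀ x ∈ pvGHits g low, j ≤ x := by
  intro x hx
  exact (pvGHits_mem hall x hx) ▸ hjk

theorem pvGHits_ne_nil {g : List (String × Nat)} {low : String}
    (h : g.any (fun kp => PySem.Str.isIn kp.1 low) = true) : pvGHits g low ≠ [] := by
  simp only [List.any_eq_true] at h
  obtain ⟨kp, hmem, hin⟩ := h
  simp only [pvGHits, ne_eq, List.map_eq_nil_iff, List.filter_eq_nil_iff]
  intro hall
  exact hall kp hmem hin

theorem pvGHits_nil {g : List (String × Nat)} {low : String}
    (h : g.any (fun kp => PySem.Str.isIn kp.1 low) = false) : pvGHits g low = [] := by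
  simp only [List.any_eq_false] at h
  simp only [pvGHits, List.map_eq_nil_iff, List.filter_eq_nil_iff]
  exact h

theorem foldl_min_of_le (l : List Nat) (a : Nat) (h : ∀ x ∈ l, a ≤ x) :
    l.foldl Nat.min a = a := by
  induction l generalizing a with
  | nil => rfl
  | cons x t ih =>
    have hax : a ≤ x := h x (List.mem_cons_self)
    simp only [List.foldl_cons, Nat.min_eq_left hax]
    exact ih a (fun y hy => h y (List.mem_cons_of_mem _ hy))

theorem foldl_min_stage (l rest : List Nat) (j : Nat) (hne : l ≠ [])
    (hl : ∀ x ∈ l, x = j) (hrest : ∀ x ∈ rest, j ≤ x) (hj : j ≤ 6) :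
    (l ++ rest).foldl Nat.min 6 = j := by
  obtain ⟨x, t, rfl⟩ := List.exists_cons_of_ne_nil hne
  have hx : x = j := hl x (List.mem_cons_self)
  subst hx
  simp only [List.cons_append, List.foldl_cons, Nat.min_eq_right hj]
  apply foldl_min_of_le
  intro y hy
  rcases List.mem_append.mp hy with h1 | h2
  · exact (hl y (List.mem_cons_of_mem _ h1)).ge
  · exact hrest y h2

set_option maxHeartbeats 1000000 in
theorem pv_eq (url page_text : String) :
    guess_units_py url page_text = guess_units_py_alt url page_text := by
  simp only [guess_units_py, guess_units_py_alt]
  generalize PySem.Str.lower (url ++ " " ++ page_text) = low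
  have m0 : ∀ x ∈ pvG0, x.2 = 0 := by decide
  have m1 : ∀ x ∈ pvG1, x.2 = 1 := by decide
  have m2 : ∀ x ∈ pvG2, x.2 = 2 := by decide
  have m3 : ∀ x ∈ pvG3, x.2 = 3 := by decide
  have m4 : ∀ x ∈ pvG4, x.2 = 4 := by decide
  have m5 : ∀ x ∈ pvG5, x.2 = 5 := by decide
  by_cases h0 : pvG0.any (fun kp => PySem.Str.isIn kp.1 low) = true
  · have hc0 : (PySem.Str.isIn "cerveza-six-pack" low || PySem.Str.isIn "six pack" low || PySem.Str.isIn "six-pack" low) = true := by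
      simp only [Bool.or_assoc]
      simpa only [pvG0, List.any_cons, List.any_nil, Bool.or_false] using h0
    have hfold : (pvHits low).foldl Nat.min 6 = 0 := by
      rw [pvHits_split]
      exact foldl_min_stage _ _ 0 (pvGHits_ne_nil h0) (pvGHits_mem m0) (fun x _ => Nat.zero_le x) (by omega)
    rw [hfold, hc0]
    simp [pvResults]
  · have hb0 := Bool.eq_false_iff.mpr h0
    have hc0 : (PySem.Str.isIn "cerveza-six-pack" low || PySem.Str.isIn "six pack" low || PySem.Str.isIn "six-pack" low) = false := by
      simp only [Bool.or_assoc]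
      simpa only [pvG0, List.any_cons, List.any_nil, Bool.or_false] using hb0
    have e0 : pvGHits pvG0 low = [] := pvGHits_nil hb0
    by_cases h1 : pvG1.any (fun kp => PySem.Str.isIn kp.1 low) = true
    · have hc1 : (PySem.Str.isIn "nectar-mixto" low || PySem.Str.isIn "v8" low || PySem.Str.isIn "lata" low) = true := by
        simp only [Bool.or_assoc]
        simpa only [pvG1, List.any_cons, List.any_nil, Bool.or_false] using h1
      have hfold : (pvHits low).foldl Nat.min 6 = 1 := by
        rw [pvHits_split, e0, List.nil_append]
        refine foldl_min_stage _ _ 1 (pvGHits_ne_nil h1) (pvGHits_mem m1) ?_ (by omega)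
        intro x hx
        rcases List.mem_append.mp hx with h | h
        · exact pvGHits_ge m2 (by omega) x h
        rcases List.mem_append.mp h with h | h
        · exact pvGHits_ge m3 (by omega) x h
        rcases List.mem_append.mp h with h | h
        · exact pvGHits_ge m4 (by omega) x h
        · exact pvGHits_ge m5 (by omega) x h
      rw [hfold, hc0, hc1]
      simp [pvResults]
    · have hb1 := Bool.eq_false_iff.mpr h1
      have hc1 : (PySem.Str.isIn "nectar-mixto" low || PySem.Str.isIn "v8" low || PySem.Str.isIn "lata" low) = false := by
        simp only [Bool.or_assoc]
        simpa only [pvG1, List.any_cons, List.any_nil, Bool.or_false] using hb1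
      have e1 : pvGHits pvG1 low = [] := pvGHits_nil hb1
      by_cases h2 : pvG2.any (fun kp => PySem.Str.isIn kp.1 low) = true
      · have hc2 : (PySem.Str.isIn "kg" low || PySem.Str.isIn "kilo" low ||
            (["pulpa-de-res", "jamon-de-pierna", "tocineta", "cebolla"].any (fun k => PySem.Str.isIn k low))) = true := by
          simp only [List.any_cons, List.any_nil, Bool.or_false, Bool.or_assoc]
          simpa only [pvG2, List.any_cons, List.any_nil, Bool.or_false, Bool.or_assoc] using h2
        have hfold : (pvHits low).foldl Nat.min 6 = 2 := by
          rw [pvHits_split, e0, e1, List.nil_append, List.nil_append]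
          refine foldl_min_stage _ _ 2 (pvGHits_ne_nil h2) (pvGHits_mem m2) ?_ (by omega)
          intro x hx
          rcases List.mem_append.mp hx with h | h
          · exact pvGHits_ge m3 (by omega) x h
          rcases List.mem_append.mp h with h | h
          · exact pvGHits_ge m4 (by omega) x h
          · exact pvGHits_ge m5 (by omega) x h
        rw [hfold, hc0, hc1, hc2]
        simp [pvResults]
      · have hb2 := Bool.eq_false_iff.mpr h2
        have hc2 : (PySem.Str.isIn "kg" low || PySem.Str.isIn "kilo" low ||
            (["pulpa-de-res", "jamon-de-pierna", "tocineta", "cebolla"].any (fun k => PySem.Str.isIn k low))) = false := by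
          simp only [List.any_cons, List.any_nil, Bool.or_false, Bool.or_assoc]
          simpa only [pvG2, List.any_cons, List.any_nil, Bool.or_false, Bool.or_assoc] using hb2
        have e2 : pvGHits pvG2 low = [] := pvGHits_nil hb2
        by_cases h3 : pvG3.any (fun kp => PySem.Str.isIn kp.1 low) = true
        · have hc3 : PySem.Str.isIn "chorizo" low = true := by
            simpa only [pvG3, List.any_cons, List.any_nil, Bool.or_false] using h3
          have hfold : (pvHits low).foldl Nat.min 6 = 3 := by
            rw [pvHits_split, e0, e1, e2, List.nil_append, List.nil_append, List.nil_append]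
            refine foldl_min_stage _ _ 3 (pvGHits_ne_nil h3) (pvGHits_mem m3) ?_ (by omega)
            intro x hx
            rcases List.mem_append.mp hx with h | h
            · exact pvGHits_ge m4 (by omega) x h
            · exact pvGHits_ge m5 (by omega) x h
          rw [hfold, hc0, hc1, hc2, hc3]
          simp [pvResults]
        · have hb3 := Bool.eq_false_iff.mpr h3
          have hc3 : PySem.Str.isIn "chorizo" low = false := by
            simpa only [pvG3, List.any_cons, List.any_nil, Bool.or_false] using hb3
          have e3 : pvGHits pvG3 low = [] := pvGHits_nil hb3
          by_cases h4 : pvG4.any (fun kp => PySem.Str.isIn kp.1 low) = true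
          · have hc4 : (PySem.Str.isIn "salchicha" low || PySem.Str.isIn "salchichas" low) = true := by
              simpa only [pvG4, List.any_cons, List.any_nil, Bool.or_false] using h4
            have hfold : (pvHits low).foldl Nat.min 6 = 4 := by
              rw [pvHits_split, e0, e1, e2, e3, List.nil_append, List.nil_append,
                List.nil_append, List.nil_append]
              refine foldl_min_stage _ _ 4 (pvGHits_ne_nil h4) (pvGHits_mem m4) ?_ (by omega)
              intro x hx
              exact pvGHits_ge m5 (by omega) x hx
            rw [hfold, hc0, hc1, hc2, hc3, hc4]
            simp [pvResults]
          · have hb4 := Bool.eq_false_iff.mpr h4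
            have hc4 : (PySem.Str.isIn "salchicha" low || PySem.Str.isIn "salchichas" low) = false := by
              simpa only [pvG4, List.any_cons, List.any_nil, Bool.or_false] using hb4
            have e4 : pvGHits pvG4 low = [] := pvGHits_nil hb4
            by_cases h5 : pvG5.any (fun kp => PySem.Str.isIn kp.1 low) = true
            · have hc5 : PySem.Str.isIn "paquete" low = true := by
                simpa only [pvG5, List.any_cons, List.any_nil, Bool.or_false] using h5
              have hfold : (pvHits low).foldl Nat.min 6 = 5 := by
                rw [pvHits_split, e0, e1, e2, e3, e4, List.nil_append, List.nil_append,
                  List.nil_append, List.nil_append, List.nil_append]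
                have h := foldl_min_stage (pvGHits pvG5 low) [] 5 (pvGHits_ne_nil h5)
                  (pvGHits_mem m5) (fun x hx => absurd hx (List.not_mem_nil)) (by omega)
                simpa using h
              rw [hfold, hc0, hc1, hc2, hc3, hc4, hc5]
              simp [pvResults]
            · have hb5 := Bool.eq_false_iff.mpr h5
              have hc5 : PySem.Str.isIn "paquete" low = false := by
                simpa only [pvG5, List.any_cons, List.any_nil, Bool.or_false] using hb5
              have e5 : pvGHits pvG5 low = [] := pvGHits_nil hb5
              have hfold : (pvHits low).foldl Nat.min 6 = 6 := by
                rw [pvHits_split, e0, e1, e2, e3, e4, e5]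
                rfl
              rw [hfold, hc0, hc1, hc2, hc3, hc4, hc5]
              simp [pvResults]

-- ===== VERDICT (by name: the statement is the Claim_ definition above) =====
theorem guess_units_py_spec : Claim_equal_guess_units_py := by
  intro url page_text _
  unfold Spec_guess_units_py
  exact pv_eq url page_text
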